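-- pv_equiv track=rewrite | github.com/Thomas11411/Python-LeetCode | 4053-majority-frequency-characters/4053-majority-frequency-characters.py | majorityFrequencyGroup
-- ===== SOURCE A (Python) =====
-- def majorityFrequencyGroup(s: str) -> str:
--     import collections
--     cnt = collections.Counter(s).items()
--     d = collections.defaultdict(list)
--
--     for ch, k in cnt:
--         d[k].append(ch)
--
--     res = max(d, key = lambda x: (len(d[x]), x))
--
--     return ''.join(d[res])
-- ===== SOURCE B (Python) =====
-- def majorityFrequencyGroup(s: str) -> str:
--     import collections
--     cnt = collections.Counter(s)
--     best = ''
--     for f in sorted(set(cnt.values())):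
--         g = ''.join(ch for ch, k in cnt.items() if k == f)
--         if len(g) >= len(best):
--             best = g
--     return best
-- ===== Notes on version B (the rewrite author's own statement) =====
-- stated objective: alternative
-- what changed: B drops A's per-frequency dict of character lists and the keyed max(): it sorts the distinct frequency values ascending, re-derives each frequency's character group by filtering the Counter's items, and keeps the last group whose size is >= the best so far (the ascending order makes the tie-break to the larger frequency implicit).
-- outside the precondition, e.g. on majorityFrequencyGroup(''): A raises ValueError, B returns ''
import Mathlib
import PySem

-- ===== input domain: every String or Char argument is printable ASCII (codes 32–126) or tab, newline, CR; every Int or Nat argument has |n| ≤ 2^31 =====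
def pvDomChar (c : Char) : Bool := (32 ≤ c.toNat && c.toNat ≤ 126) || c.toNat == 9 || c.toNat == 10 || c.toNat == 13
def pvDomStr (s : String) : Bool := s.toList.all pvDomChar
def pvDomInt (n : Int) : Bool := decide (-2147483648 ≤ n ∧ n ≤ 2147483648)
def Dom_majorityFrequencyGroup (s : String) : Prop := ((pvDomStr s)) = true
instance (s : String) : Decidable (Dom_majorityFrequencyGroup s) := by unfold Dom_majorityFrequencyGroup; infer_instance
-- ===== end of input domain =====

-- B replaces A's per-frequency grouping dict and keyed max by a scan over the sorted distinct
-- frequencies that re-filters the Counter and keeps the last group of maximal size (objective: alternative).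

-- ===== PORT A =====
def majorityFrequencyGroup (s : String) : String :=
  let cnt := (PySem.Dict.counter s.toList).items
  let d := cnt.foldl (fun d p => d.modify p.2 ([] : List Char) (· ++ [p.1])) PySem.Dict.empty
  match PySem.List.max2? d.keys (fun x => ((d.getD x []).length : Int)) (fun x => x) with
  | some res => String.ofList (d.getD res [])
  | none => ""   -- unreachable under Pre_: Python's max raises ValueError on the empty dict

-- ===== PORT B =====
def majorityFrequencyGroup_alt (s : String) : String :=
  let cnt := PySem.Dict.counter s.toList
  let best := (PySem.List.sorted (PySem.Set.ofList cnt.values) (fun x => x) false).foldl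
    (fun best f =>
      let g := (cnt.items.filter (fun p => p.2 == f)).map (·.1)
      if best.length ≤ g.length then g else best) []
  String.ofList best

-- ===== PRECONDITION & SPEC =====
-- Pre_ excludes only s = "", on which Python A raises ValueError (max of an empty dict).
def Pre_majorityFrequencyGroup (s : String) : Prop := s ≠ ""
instance (s : String) : Decidable (Pre_majorityFrequencyGroup s) := by unfold Pre_majorityFrequencyGroup; infer_instance
def pvWitness_majorityFrequencyGroup : String := "aab"
def Spec_majorityFrequencyGroup (s : String) (out : String) : Prop := out = majorityFrequencyGroup_alt s
instance (s : String) (out : String) : Decidable (Spec_majorityFrequencyGroup s out) := by unfold Spec_majorityFrequencyGroup; infer_instance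

-- ===== CLAIM (what is proved, stated in full; the proofs are below) =====
def Claim_equal_majorityFrequencyGroup : Prop := ∀ (s : String), Dom_majorityFrequencyGroup s → Pre_majorityFrequencyGroup s → Spec_majorityFrequencyGroup s (majorityFrequencyGroup s)

-- ===== LEMMAS AND PROOFS =====

-- the per-frequency group of characters, read off the counter items
def pvGrp (L : List (Char × Int)) (f : Int) : List Char :=
  (L.filter (fun p => p.2 == f)).map (·.1)

-- strict lexicographic order on (k1 x, x) — the unique-maximum order both selections agree on
def pvLex (k1 : Int → Int) (a b : Int) : Prop := k1 a < k1 b ∨ (k1 a = k1 b ∧ a < b)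

theorem pvLex_trans (k1 : Int → Int) {a b c : Int} (h1 : pvLex k1 a b) (h2 : pvLex k1 b c) :
    pvLex k1 a c := by
  unfold pvLex at *; omega

-- the body of PySem.List.max2? with k2 = identity
def pvStep (k1 : Int → Int) (acc : Option Int) (x : Int) : Option Int :=
  match acc with
  | none => some x
  | some m => if (decide (k1 m < k1 x) || !decide (k1 x < k1 m) && decide (m < x)) = true then some x else some m

theorem pvStep_none (k1 : Int → Int) (x : Int) : pvStep k1 none x = some x := rfl

theorem pvStep_some (k1 : Int → Int) (m0 x : Int) :
    pvStep k1 (some m0) x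
      = if (decide (k1 m0 < k1 x) || !decide (k1 x < k1 m0) && decide (m0 < x)) = true
        then some x else some m0 := rfl

theorem pv_foldl_step_some (k1 : Int → Int) :
    ∀ (X : List Int) (m0 : Int), ∃ m, X.foldl (pvStep k1) (some m0) = some m := by
  intro X
  induction X with
  | nil => intro m0; exact ⟨m0, rfl⟩
  | cons x t ih =>
    intro m0
    simp only [List.foldl_cons, pvStep_some]
    split_ifs
    · exact ih x
    · exact ih m0

theorem pv_foldl_step_max (k1 : Int → Int) :
    ∀ (X : List Int) (m0 m : Int), X.foldl (pvStep k1) (some m0) = some m →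
      (m = m0 ∨ m ∈ X) ∧ (m0 ≠ m → pvLex k1 m0 m) ∧ (∀ y ∈ X, y ≠ m → pvLex k1 y m) := by
  intro X
  induction X with
  | nil =>
    intro m0 m h
    simp only [List.foldl_nil, Option.some.injEq] at h
    subst h
    exact ⟨Or.inl rfl, fun h => absurd rfl h, by simp⟩
  | cons x t ih =>
    intro m0 m h
    simp only [List.foldl_cons, pvStep_some] at h
    split_ifs at h with hc
    · -- the new champion is x
      simp only [Bool.or_eq_true, Bool.and_eq_true, Bool.not_eq_true', decide_eq_true_eq,
        decide_eq_false_iff_not] at hc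
      have lex0x : pvLex k1 m0 x := by unfold pvLex; omega
      obtain ⟨hmem, hx, ht⟩ := ih x m h
      refine ⟨?_, ?_, ?_⟩
      · rcases hmem with h' | h'
        · exact Or.inr (h' ▸ List.mem_cons_self ..)
        · exact Or.inr (List.mem_cons_of_mem _ h')
      · intro _
        by_cases hxm : x = m
        · exact hxm ▸ lex0x
        · exact pvLex_trans k1 lex0x (hx hxm)
      · intro y hy hym
        rcases List.mem_cons.mp hy with h' | h'
        · exact h' ▸ hx (h' ▸ hym)
        · exact ht y h' hym
    · -- the champion m0 stays
      simp only [Bool.or_eq_true, Bool.and_eq_true, Bool.not_eq_true', decide_eq_true_eq,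
        decide_eq_false_iff_not] at hc
      push Not at hc
      obtain ⟨hmem, hm0, ht⟩ := ih m0 m h
      refine ⟨?_, hm0, ?_⟩
      · rcases hmem with h' | h'
        · exact Or.inl h'
        · exact Or.inr (List.mem_cons_of_mem _ h')
      · intro y hy hym
        rcases List.mem_cons.mp hy with h' | h'
        · subst h'
          have lexy0 : y = m0 ∨ pvLex k1 y m0 := by
            by_cases h0 : y = m0
            · exact Or.inl h0
            · exact Or.inr (by unfold pvLex; omega)
          rcases lexy0 with h0 | h0
          · exact h0 ▸ hm0 (h0 ▸ hym)
          · by_cases h1 : m0 = m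
            · exact h1 ▸ h0
            · exact pvLex_trans k1 h0 (hm0 h1)
        · exact ht y h' hym

theorem pv_max2?_eq_foldl (k1 : Int → Int) (X : List Int) :
    PySem.List.max2? X k1 (fun x => x) = X.foldl (pvStep k1) none := by
  simp only [PySem.List.max2?]
  congr 1
  funext acc x
  cases acc <;> rfl

theorem pv_max2?_max (k1 : Int → Int) (X : List Int) (m : Int)
    (h : PySem.List.max2? X k1 (fun x => x) = some m) :
    m ∈ X ∧ ∀ y ∈ X, y ≠ m → pvLex k1 y m := by
  rw [pv_max2?_eq_foldl] at h
  cases X with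
  | nil => exact absurd h (by simp)
  | cons x t =>
    rw [List.foldl_cons, pvStep_none] at h
    obtain ⟨hmem, hx, ht⟩ := pv_foldl_step_max k1 t x m h
    refine ⟨?_, ?_⟩
    · rcases hmem with h' | h'
      · exact h' ▸ List.mem_cons_self ..
      · exact List.mem_cons_of_mem _ h'
    · intro y hy hym
      rcases List.mem_cons.mp hy with h' | h'
      · exact h' ▸ hx (h' ▸ hym)
      · exact ht y h' hym

theorem pv_max2?_isSome (k1 : Int → Int) (X : List Int) (h : X ≠ []) :
    ∃ m, PySem.List.max2? X k1 (fun x => x) = some m := by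
  rw [pv_max2?_eq_foldl]
  cases X with
  | nil => exact absurd rfl h
  | cons x t =>
    rw [List.foldl_cons, pvStep_none]
    exact pv_foldl_step_some k1 t x

-- the selection is order-independent: two lists with the same members give the same max2?
theorem pv_max2?_perm (k1 : Int → Int) (X Y : List Int)
    (hmem : ∀ y, y ∈ X ↔ y ∈ Y) (hX : X ≠ []) :
    PySem.List.max2? X k1 (fun x => x) = PySem.List.max2? Y k1 (fun x => x) := by
  obtain ⟨x0, hx0⟩ := List.exists_mem_of_ne_nil X hX
  have hY : Y ≠ [] := List.ne_nil_of_mem ((hmem x0).mp hx0)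
  obtain ⟨mX, hmX⟩ := pv_max2?_isSome k1 X hX
  obtain ⟨mY, hmY⟩ := pv_max2?_isSome k1 Y hY
  obtain ⟨hmXmem, hmXmax⟩ := pv_max2?_max k1 X mX hmX
  obtain ⟨hmYmem, hmYmax⟩ := pv_max2?_max k1 Y mY hmY
  have heq : mX = mY := by
    by_contra hne
    have h1 := hmYmax mX ((hmem mX).mp hmXmem) hne
    have h2 := hmXmax mY ((hmem mY).mpr hmYmem) (Ne.symm hne)
    unfold pvLex at h1 h2
    omega
  rw [hmX, hmY, heq]

-- B's keep-the-best scan over an ascending list of frequencies computes the max2? selection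
theorem pv_scan_eq_max2? (g : Int → List Char) :
    ∀ (F : List Int), F.Pairwise (· < ·) →
      F.foldl (fun best f => if best.length ≤ (g f).length then g f else best) []
        = (match PySem.List.max2? F (fun f => ((g f).length : Int)) (fun x => x) with
           | some m => g m
           | none => []) := by
  intro F
  induction F using List.reverseRecOn with
  | nil => intro _; rfl
  | append_singleton F f ih =>
    intro hp
    rw [List.pairwise_append] at hp
    obtain ⟨hp', _, hlt⟩ := hp
    rw [List.foldl_append, ih hp']
    have hr : PySem.List.max2? (F ++ [f]) (fun f => ((g f).length : Int)) (fun x => x)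
        = pvStep (fun f => ((g f).length : Int))
            (PySem.List.max2? F (fun f => ((g f).length : Int)) (fun x => x)) f := by
      rw [pv_max2?_eq_foldl, List.foldl_append, List.foldl_cons, List.foldl_nil,
        ← pv_max2?_eq_foldl]
    rw [hr]
    cases hm : PySem.List.max2? F (fun f => ((g f).length : Int)) (fun x => x) with
    | none =>
      simp only [List.foldl_cons, List.foldl_nil, pvStep_none]
      simp
    | some m =>
      have hmf : m < f := hlt m (pv_max2?_max _ F m hm).1 f (List.mem_singleton.mpr rfl)
      simp only [List.foldl_cons, List.foldl_nil, pvStep_some]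
      by_cases hle : (g m).length ≤ (g f).length
      · have hc : (decide (((g m).length : Int) < ((g f).length : Int))
            || !decide (((g f).length : Int) < ((g m).length : Int)) && decide (m < f)) = true := by
          simp only [Bool.or_eq_true, Bool.and_eq_true, Bool.not_eq_true', decide_eq_true_eq,
            decide_eq_false_iff_not]
          omega
        rw [if_pos hc, if_pos hle]
      · have hc : ¬ ((decide (((g m).length : Int) < ((g f).length : Int))
            || !decide (((g f).length : Int) < ((g m).length : Int)) && decide (m < f)) = true) := by
          simp only [Bool.or_eq_true, Bool.and_eq_true, Bool.not_eq_true', decide_eq_true_eq,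
            decide_eq_false_iff_not]
          omega
        rw [if_neg hc, if_neg hle]

-- A's grouping dict d, characterised over the counter items.
theorem pv_d_getD (items : List (Char × Int)) (k : Int) :
    ((items.foldl (fun d p => d.modify p.2 ([] : List Char) (· ++ [p.1])) PySem.Dict.empty).getD k [])
      = pvGrp items k := by
  have h1 : items.foldl (fun d p => d.modify p.2 ([] : List Char) (· ++ [p.1])) PySem.Dict.empty
      = (items.map (fun p => (p.2, p.1))).foldl (fun d p => d.modify p.1 ([] : List Char) (· ++ [p.2])) PySem.Dict.empty := by
    rw [List.foldl_map]
  rw [h1, PySem.Dict.getD_foldl_modify_append, List.filter_map, List.map_map]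
  simp [pvGrp, Function.comp_def]

theorem pv_d_keys (items : List (Char × Int)) :
    (items.foldl (fun d p => d.modify p.2 ([] : List Char) (· ++ [p.1])) PySem.Dict.empty).keys
      = PySem.Set.ofList (items.map (·.2)) := by
  have := PySem.Dict.keys_foldl_modify_key (l := items) (key := (·.2))
    (d0 := ([] : List Char)) (f := fun (d : PySem.Dict Int (List Char)) p => (· ++ [p.1])) (d := PySem.Dict.empty)
  simpa [PySem.Dict.keys_empty, PySem.Set.update, PySem.Set.ofList_eq_foldl] using this

-- ===== VERDICT (by name: the statement is the Claim_ definition above) =====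
theorem majorityFrequencyGroup_spec : Claim_equal_majorityFrequencyGroup := by
  intro s _ hpre
  unfold Spec_majorityFrequencyGroup majorityFrequencyGroup majorityFrequencyGroup_alt
  dsimp only
  simp only [pv_d_getD, pv_d_keys, PySem.Dict.values, pvGrp]
  set L := (PySem.Dict.counter s.toList).items with hL
  set g : Int → List Char := fun f => (L.filter (fun p => p.2 == f)).map (·.1) with hg
  set K : List Int := PySem.Set.ofList (L.map (·.2)) with hK
  set F : List Int := PySem.List.sorted K (fun x => x) false with hF
  -- B's scan over the ascending distinct frequencies is the max2? selection over F
  have hscan := pv_scan_eq_max2? g F (by rw [hF, hK]; exact PySem.List.sorted_ofList_pairwise_lt _)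
  -- nonemptiness of the key list
  have hs : s.toList ≠ [] := fun hc => hpre (by rw [← String.ofList_toList (s := s), hc])
  have hKne : K ≠ [] := by
    obtain ⟨c, hc⟩ := List.exists_mem_of_ne_nil _ hs
    have hcL : (c, (s.toList.count c : Int)) ∈ L := by
      rw [hL, PySem.Dict.items_counter]
      exact List.mem_map_of_mem ((PySem.Set.mem_ofList _ _).mpr hc)
    have : (s.toList.count c : Int) ∈ K := by
      rw [hK]
      exact (PySem.Set.mem_ofList _ _).mpr (List.mem_map_of_mem hcL)
    exact List.ne_nil_of_mem this
  -- the two selections agree: same members, unique lexicographic maximum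
  have hperm := pv_max2?_perm (fun f => ((g f).length : Int)) K F
    (fun y => (PySem.List.mem_sorted _ _ _ _).symm) hKne
  rw [hscan, ← hperm]
  cases PySem.List.max2? K (fun f => ((g f).length : Int)) (fun x => x) with
  | none => rfl
  | some m => rfl
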